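-- pv_equiv track=rewrite | github.com/Tridence/alx-higher_level_programming | 0x03-python-data_structures/8-multiple_returns.py | multiple_returns
-- ===== SOURCE A (Python) =====
-- def multiple_returns(sentence):
--     count = 0
--     if sentence != '':
--         firstChar = sentence[0]
--         for i in range(len(sentence)):
--             count += 1
--     else:
--         firstChar = None
--     return (count, firstChar)
-- ===== SOURCE B (Python) =====
-- def multiple_returns(sentence):
--     return (len(sentence), sentence[0] if sentence else None)
-- ===== Notes on version B (the rewrite author's own statement) =====
-- stated objective: faster
-- what changed: B replaces A's element-by-element counting loop with the O(1) built-in len() and a conditional first character, a single expression with no loop.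
import Mathlib
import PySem

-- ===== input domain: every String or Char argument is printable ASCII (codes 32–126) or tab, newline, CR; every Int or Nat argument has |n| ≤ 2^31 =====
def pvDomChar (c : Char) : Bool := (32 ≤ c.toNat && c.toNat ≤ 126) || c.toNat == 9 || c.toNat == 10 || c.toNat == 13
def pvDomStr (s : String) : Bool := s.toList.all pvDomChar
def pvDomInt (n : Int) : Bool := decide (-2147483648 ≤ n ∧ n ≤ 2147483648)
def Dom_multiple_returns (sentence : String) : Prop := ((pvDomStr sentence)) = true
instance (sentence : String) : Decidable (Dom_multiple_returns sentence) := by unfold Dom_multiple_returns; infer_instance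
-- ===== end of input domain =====

-- B replaces A's counting loop with the built-in length and a conditional first character (objective: simpler).


-- ===== PORT A =====
-- Transliteration of A: count incremented once per index of range(len(sentence));
-- firstChar = sentence[0] mapped to a one-char string, or none on the empty string.
def multiple_returns (sentence : String) : Int × Option String :=
  let count : Int := 0
  if sentence ≠ "" then
    let firstChar : Option String := (PySem.Str.pyGet? sentence 0).map (fun c => String.ofList [c])
    let count := (PySem.List.pyRange 0 (PySem.Str.len sentence) 1).foldl (fun c _ => c + 1) count
    (count, firstChar)
  else
    (count, none)

-- ===== PORT B =====
-- B: closed-form length plus a conditional first character, no loop.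
def multiple_returns_alt (sentence : String) : Int × Option String :=
  (PySem.Str.len sentence,
   if sentence = "" then none
   else (PySem.Str.pyGet? sentence 0).map (fun c => String.ofList [c]))

-- ===== PRECONDITION & SPEC =====
def Spec_multiple_returns (sentence : String) (out : Int × Option String) : Prop := out = multiple_returns_alt sentence
instance (sentence : String) (out : Int × Option String) : Decidable (Spec_multiple_returns sentence out) := by unfold Spec_multiple_returns; infer_instance

-- ===== CLAIM (what is proved, stated in full; the proofs are below) =====
def Claim_equal_multiple_returns : Prop := ∀ (sentence : String), Dom_multiple_returns sentence → Spec_multiple_returns sentence (multiple_returns sentence)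

-- ===== LEMMAS AND PROOFS =====

-- ===== VERDICT (by name: the statement is the Claim_ definition above) =====
theorem foldl_count (l : List Int) (c : Int) :
    l.foldl (fun c _ => c + 1) c = c + l.length := by
  induction l generalizing c with
  | nil => simp
  | cons x xs ih => simp [List.foldl, ih]; omega

theorem multiple_returns_spec : Claim_equal_multiple_returns := by
  intro s _
  unfold Spec_multiple_returns multiple_returns multiple_returns_alt
  by_cases h : s = ""
  · simp [h, PySem.Str.len]
  · simp [h, foldl_count, PySem.List.length_pyRange_one, PySem.Str.len_eq]
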